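-- pv_equiv track=rewrite | github.com/1000zoo/upbit | cnn_/chart_generator/chart_generator.py | generate_to_order
-- ===== SOURCE A (Python) =====
-- def generate_to_order(il=1):
--     years = range(2018, 2023)
--     months = range(1,13)
--     hours = range(24)
--     minutes = range(60//il)
--     d28 = [2]
--     d30 = [4,6,9,11]
--     d31 = [1,3,5,7,8,10,12]
--
--     for year in years:
--         for month in months:
--             if d28.__contains__(month):
--                 if year == 2020:
--                     days = range(1,30)
--                 else:
--                     days = range(1,29)
--             elif d30.__contains__(month):
--                 days = range(1,31)
--             elif d31.__contains__(month):
--                 days = range(1,32)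
--
--             for day in days:
--                 for hour in hours:
--                     for m in minutes:
--                         minute = m * il
--                         yield to_format(year, month, day, hour, minute)
--
-- def to_format(year, month, day, hour, minute):
--     to = ""
--     to += my_format(year)
--     to += my_format(month)
--     to += my_format(day)
--     to += my_format(hour)
--     to += my_format(minute)
--     return to
--
-- def my_format(t):
--     if t < 10:
--         return "0" + str(t)
--     else:
--         return str(t)
-- ===== SOURCE B (Python) =====
-- def generate_to_order(il=1):
--     # Single ordinal-day counter converted back to (year, month, day), and a single
--     # time-slot counter decoded by div/mod, instead of nested date/time loops.
--     q = 60 // il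
--
--     def split(n, lens, idx):
--         # find the segment of the partition `lens` that ordinal n falls into
--         if n < lens[0]:
--             return idx, n
--         return split(n - lens[0], lens[1:], idx + 1)
--
--     ylens = [365, 365, 366, 365, 365]
--     for n in range(sum(ylens)):
--         yi, r = split(n, ylens, 0)
--         year = 2018 + yi
--         mlens = [31, 29 if year == 2020 else 28, 31, 30, 31, 30, 31, 31, 30, 31, 30, 31]
--         month, d = split(r, mlens, 1)
--         date = str(year).zfill(4) + str(month).zfill(2) + str(d + 1).zfill(2)
--         for t in range(24 * q):
--             yield date + str(t // q).zfill(2) + str((t % q) * il).zfill(2)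
-- ===== Notes on version B (the rewrite author's own statement) =====
-- stated objective: alternative
-- what changed: B replaces A's five nested date/time loops and month tables entirely: it runs one counter over the 1826 day ordinals and reconstructs (year, month, day) with a recursive partition-split over year/month length lists, and one counter over the 24*(60//il) time slots decoded into hour/minute by div/mod, formatting with zfill instead of the char-prepending helper.
import Mathlib
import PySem

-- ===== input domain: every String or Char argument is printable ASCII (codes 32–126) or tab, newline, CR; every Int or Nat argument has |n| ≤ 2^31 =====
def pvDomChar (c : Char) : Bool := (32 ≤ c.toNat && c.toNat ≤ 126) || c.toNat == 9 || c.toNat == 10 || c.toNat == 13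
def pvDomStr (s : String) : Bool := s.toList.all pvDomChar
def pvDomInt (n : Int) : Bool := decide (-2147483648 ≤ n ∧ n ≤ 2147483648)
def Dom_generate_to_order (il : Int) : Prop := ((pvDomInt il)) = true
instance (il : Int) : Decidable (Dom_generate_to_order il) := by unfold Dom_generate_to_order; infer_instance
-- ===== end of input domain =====

-- B enumerates one ordinal-day counter decoded to (year,month,day) by a recursive partition split,
-- and one time-slot counter decoded to hour/minute by div/mod, instead of A's five nested loops
-- with month tables and a char-prepending formatter. (alternative; equal cost)

-- ===== PORT A =====
def my_format (t : Int) : String :=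
  if t < 10 then "0" ++ PySem.Int.toStr t else PySem.Int.toStr t

def to_format (year month day hour minute : Int) : String :=
  my_format year ++ my_format month ++ my_format day ++ my_format hour ++ my_format minute

def generate_to_order (il : Int) : List String :=
  (PySem.List.pyRange 2018 2023 1).flatMap (fun year =>
    (PySem.List.pyRange 1 13 1).flatMap (fun month =>
      let days :=
        if [(2 : Int)].contains month then
          (if year == 2020 then PySem.List.pyRange 1 30 1 else PySem.List.pyRange 1 29 1)
        else if [(4 : Int), 6, 9, 11].contains month then PySem.List.pyRange 1 31 1
        else if [(1 : Int), 3, 5, 7, 8, 10, 12].contains month then PySem.List.pyRange 1 32 1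
        else []  -- unreachable for month ∈ 1..12 (Python would reuse the stale 'days' here)
      days.flatMap (fun day =>
        (PySem.List.pyRange 0 24 1).flatMap (fun hour =>
          (PySem.List.pyRange 0 (PySem.Int.floordiv 60 il) 1).map (fun m =>
            to_format year month day hour (m * il))))))

-- ===== PORT B =====
-- Source B's recursive helper `split(n, lens, idx)`; the [] case is unreachable in Python
-- (n < sum(lens) always holds at the call sites), where Python would raise IndexError.
def pvSplit : Int → List Int → Int → Int × Int
  | n, [], idx => (idx, n)
  | n, L :: ls, idx => if n < L then (idx, n) else pvSplit (n - L) ls (idx + 1)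

-- str(t).zfill(w)
def pad (t : Int) (w : Nat) : String := PySem.Str.zfill (PySem.Int.toStr t) w

-- the body of Source B's loop over the day ordinal n
def pvStamp (il q n : Int) : List String :=
  let p := pvSplit n [365, 365, 366, 365, 365] 0
  let year := 2018 + p.1
  let mlens : List Int := [31, if year == 2020 then 29 else 28, 31, 30, 31, 30, 31, 31, 30, 31, 30, 31]
  let p2 := pvSplit p.2 mlens 1
  let date := pad year 4 ++ pad p2.1 2 ++ pad (p2.2 + 1) 2
  (PySem.List.pyRange 0 (24 * q) 1).map (fun t =>
    date ++ pad (PySem.Int.floordiv t q) 2 ++ pad (PySem.Int.mod t q * il) 2)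

def generate_to_order_alt (il : Int) : List String :=
  let q := PySem.Int.floordiv 60 il
  (PySem.List.pyRange 0 ([365, 365, 366, 365, 365] : List Int).sum 1).flatMap (pvStamp il q)

-- ===== PRECONDITION & SPEC =====
-- Pre_ excludes exactly il = 0, on which Python A raises ZeroDivisionError (60 // il).
def Pre_generate_to_order (il : Int) : Prop := il ≠ 0
instance (il : Int) : Decidable (Pre_generate_to_order il) := by
  unfold Pre_generate_to_order; infer_instance
def pvWitness_generate_to_order : Int := 7

def Spec_generate_to_order (il : Int) (out : List String) : Prop := out = generate_to_order_alt il
instance (il : Int) (out : List String) : Decidable (Spec_generate_to_order il out) := by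
  unfold Spec_generate_to_order; infer_instance

-- ===== CLAIM (what is proved, stated in full; the proofs are below) =====
def Claim_equal_generate_to_order : Prop :=
  ∀ (il : Int), Dom_generate_to_order il → Pre_generate_to_order il →
    Spec_generate_to_order il (generate_to_order il)

-- ===== LEMMAS AND PROOFS =====

theorem fm_congr {α β : Type} {l : List α} {f g : α → List β}
    (h : ∀ x ∈ l, f x = g x) : l.flatMap f = l.flatMap g := by
  simp only [List.flatMap_def]
  exact congrArg List.flatten (List.map_congr_left h)

theorem flatMap_const_nil {α β : Type} (l : List α) :
    l.flatMap (fun _ => ([] : List β)) = [] := by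
  induction l with
  | nil => rfl
  | cons a l ih => simp [List.flatMap_cons, ih]

-- shifted range
theorem pyRange_shift (c S : Int) :
    PySem.List.pyRange c (c + S) 1 = (PySem.List.pyRange 0 S 1).map (fun x => c + x) := by
  rw [PySem.List.pyRange_one, PySem.List.pyRange_one, List.map_map]
  norm_num [Function.comp_def]

-- the nested-block normal form of a split-driven enumeration
def blocks {β : Type} (lens : List Int) (idx : Int) (F : Int × Int → List β) : List β :=
  match lens with
  | [] => []
  | L :: ls => (PySem.List.pyRange 0 L 1).flatMap (fun r => F (idx, r)) ++ blocks ls (idx + 1) F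

theorem split_enum {β : Type} (lens : List Int) (idx : Int) (F : Int × Int → List β)
    (h : ∀ L ∈ lens, 0 ≤ L) :
    (PySem.List.pyRange 0 lens.sum 1).flatMap (fun n => F (pvSplit n lens idx))
      = blocks lens idx F := by
  induction lens generalizing idx with
  | nil => simp [blocks, PySem.List.pyRange_one_eq_nil]
  | cons L ls ih =>
    have hL : 0 ≤ L := h L (by simp)
    have hsum : 0 ≤ ls.sum := List.sum_nonneg (fun x hx => h x (by simp [hx]))
    rw [List.sum_cons, PySem.List.pyRange_one_append 0 L (L + ls.sum) hL (by omega),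
      List.flatMap_append, pyRange_shift L ls.sum, List.flatMap_map]
    unfold blocks
    congr 1
    · refine fm_congr (fun n hn => ?_)
      rw [PySem.List.mem_pyRange_one] at hn
      simp [pvSplit, hn.2]
    · rw [← ih (idx + 1) (fun x hx => h x (by simp [hx]))]
      refine fm_congr (fun n hn => ?_)
      rw [PySem.List.mem_pyRange_one] at hn
      simp [pvSplit, show ¬ (L + n < L) by omega]

-- flattened time-slot range as hour × minute product
theorem range_mul (a : Nat) (q : Int) (hq : 0 ≤ q) :
    PySem.List.pyRange 0 (a * q) 1
      = (PySem.List.pyRange 0 a 1).flatMap (fun h =>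
          (PySem.List.pyRange 0 q 1).map (fun m => h * q + m)) := by
  induction a with
  | zero => simp [PySem.List.pyRange_one_eq_nil]
  | succ a ih =>
    rw [show ((a + 1 : Nat) : Int) * q = (a : Int) * q + q by push_cast; ring,
      PySem.List.pyRange_one_append 0 ((a : Int) * q) ((a : Int) * q + q)
        (by positivity) (by omega),
      pyRange_shift ((a : Int) * q) q, ih,
      show ((a + 1 : Nat) : Int) = (a : Int) + 1 by push_cast; ring,
      PySem.List.pyRange_one_succ_right (show (0:Int) ≤ (a:Int) by positivity),
      List.flatMap_append]
    simp [List.flatMap_cons]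

-- zfill-based padding agrees with A's formatter on the relevant ranges
theorem pad2_eq_my_format (t : Int) (h0 : 0 ≤ t) (h99 : t ≤ 99) :
    pad t 2 = my_format t := by
  interval_cases t <;> rfl

theorem pad4_eq_my_format (y : Int) (h0 : 2018 ≤ y) (h1 : y ≤ 2022) :
    pad y 4 = my_format y := by
  interval_cases y <;> rfl

def pvTriples : List (Int × Int × Int) :=
  [(2018, 1, 31), (2018, 2, 28), (2018, 3, 31), (2018, 4, 30),
   (2018, 5, 31), (2018, 6, 30), (2018, 7, 31), (2018, 8, 31),
   (2018, 9, 30), (2018, 10, 31), (2018, 11, 30), (2018, 12, 31),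
   (2019, 1, 31), (2019, 2, 28), (2019, 3, 31), (2019, 4, 30),
   (2019, 5, 31), (2019, 6, 30), (2019, 7, 31), (2019, 8, 31),
   (2019, 9, 30), (2019, 10, 31), (2019, 11, 30), (2019, 12, 31),
   (2020, 1, 31), (2020, 2, 29), (2020, 3, 31), (2020, 4, 30),
   (2020, 5, 31), (2020, 6, 30), (2020, 7, 31), (2020, 8, 31),
   (2020, 9, 30), (2020, 10, 31), (2020, 11, 30), (2020, 12, 31),
   (2021, 1, 31), (2021, 2, 28), (2021, 3, 31), (2021, 4, 30),
   (2021, 5, 31), (2021, 6, 30), (2021, 7, 31), (2021, 8, 31),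
   (2021, 9, 30), (2021, 10, 31), (2021, 11, 30), (2021, 12, 31),
   (2022, 1, 31), (2022, 2, 28), (2022, 3, 31), (2022, 4, 30),
   (2022, 5, 31), (2022, 6, 30), (2022, 7, 31), (2022, 8, 31),
   (2022, 9, 30), (2022, 10, 31), (2022, 11, 30), (2022, 12, 31)]

def pvDayPart (il q year : Int) (p2 : Int × Int) : List String :=
  (PySem.List.pyRange 0 (24 * q) 1).map (fun t =>
    pad year 4 ++ pad p2.1 2 ++ pad (p2.2 + 1) 2 ++
      pad (PySem.Int.floordiv t q) 2 ++ pad (PySem.Int.mod t q * il) 2)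

def pvMonthPart (il q : Int) (p : Int × Int) : List String :=
  let year := 2018 + p.1
  let mlens : List Int := [31, if year == 2020 then 29 else 28, 31, 30, 31, 30, 31, 31, 30, 31, 30, 31]
  pvDayPart il q year (pvSplit p.2 mlens 1)

def pvAblock (il year month L : Int) : List String :=
  (PySem.List.pyRange 1 (L + 1) 1).flatMap (fun day =>
    (PySem.List.pyRange 0 24 1).flatMap (fun hour =>
      (PySem.List.pyRange 0 (PySem.Int.floordiv 60 il) 1).map (fun m =>
        to_format year month day hour (m * il))))

def pvBblock (il q year month L : Int) : List String :=
  (PySem.List.pyRange 0 L 1).flatMap (fun d => pvDayPart il q year (month, d))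

theorem stamp_eq (il q : Int) :
    pvStamp il q = fun n => pvMonthPart il q (pvSplit n [365, 365, 366, 365, 365] 0) := by
  funext n
  simp only [pvStamp, pvMonthPart, pvDayPart]

theorem minute_bounds (il k : Int) (hil : il ≠ 0)
    (hk : k ∈ PySem.List.pyRange 0 (PySem.Int.floordiv 60 il) 1) :
    0 ≤ k * il ∧ k * il ≤ 99 := by
  rw [PySem.List.mem_pyRange_one] at hk
  obtain ⟨hk0, hkq⟩ := hk
  rcases lt_trichotomy il 0 with hneg | hz | hpos
  · exfalso
    have hmul := PySem.Int.floordiv_mul_add_mod 60 il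
    have hb := PySem.Int.mod_neg_bounds 60 hneg
    have hq : PySem.Int.floordiv 60 il < 0 := by
      by_contra h
      have h' : 0 ≤ PySem.Int.floordiv 60 il := not_lt.mp h
      nlinarith [hmul, hb.1, hb.2]
    omega
  · exact absurd hz hil
  · have hmul := PySem.Int.floordiv_mul_add_mod 60 il
    have hr0 := PySem.Int.mod_nonneg 60 hpos
    have hr1 := PySem.Int.mod_lt 60 hpos
    constructor
    · positivity
    · have h1 : k ≤ PySem.Int.floordiv 60 il - 1 := by omega
      have h2 : k * il ≤ (PySem.Int.floordiv 60 il - 1) * il :=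
        mul_le_mul_of_nonneg_right h1 (le_of_lt hpos)
      nlinarith

theorem block_eq (il : Int) (hil : il ≠ 0) (h0q : 0 < PySem.Int.floordiv 60 il)
    (year month L : Int) (hy0 : 2018 ≤ year) (hy1 : year ≤ 2022)
    (hm0 : 1 ≤ month) (hm1 : month ≤ 12) (hL0 : 1 ≤ L) (hL1 : L ≤ 31) :
    pvAblock il year month L = pvBblock il (PySem.Int.floordiv 60 il) year month L := by
  have hil_pos : 0 < il := by
    rcases lt_trichotomy il 0 with hneg | hz | hpos
    · exfalso
      have hmul := PySem.Int.floordiv_mul_add_mod 60 il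
      have hb := PySem.Int.mod_neg_bounds 60 hneg
      nlinarith [hmul, hb.1, hb.2, h0q]
    · exact absurd hz hil
    · exact hpos
  unfold pvAblock pvBblock
  rw [show L + 1 = 1 + L by ring, pyRange_shift 1 L, List.flatMap_map]
  refine fm_congr (fun d hd => ?_)
  rw [PySem.List.mem_pyRange_one] at hd
  unfold pvDayPart
  rw [show (24 : Int) * PySem.Int.floordiv 60 il = ((24 : Nat) : Int) * PySem.Int.floordiv 60 il by norm_num,
    range_mul 24 (PySem.Int.floordiv 60 il) (le_of_lt h0q),
    show ((24 : Nat) : Int) = (24 : Int) by norm_num,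
    List.map_flatMap]
  refine fm_congr (fun h hh => ?_)
  rw [PySem.List.mem_pyRange_one] at hh
  rw [List.map_map]
  refine List.map_congr_left (fun m hm => ?_)
  have hmb := minute_bounds il m hil hm
  rw [PySem.List.mem_pyRange_one] at hm
  have hdiv : PySem.Int.floordiv (h * PySem.Int.floordiv 60 il + m) (PySem.Int.floordiv 60 il) = h := by
    rw [PySem.Int.floordiv_eq_iff_of_pos h0q]
    constructor <;> nlinarith [hm.1, hm.2]
  have hmod : PySem.Int.mod (h * PySem.Int.floordiv 60 il + m) (PySem.Int.floordiv 60 il) = m := by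
    have := PySem.Int.floordiv_mul_add_mod (h * PySem.Int.floordiv 60 il + m) (PySem.Int.floordiv 60 il)
    rw [hdiv] at this
    omega
  simp only [Function.comp]
  rw [hdiv, hmod,
    pad4_eq_my_format year hy0 hy1,
    pad2_eq_my_format month (by omega) (by omega),
    pad2_eq_my_format (d + 1) (by omega) (by omega),
    pad2_eq_my_format h hh.1 (by omega),
    pad2_eq_my_format (m * il) hmb.1 hmb.2]
  unfold to_format
  rw [show (1 : Int) + d = d + 1 by ring]

theorem A_norm (il : Int) :
    generate_to_order il = pvTriples.flatMap (fun v => pvAblock il v.1 v.2.1 v.2.2) := by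
  have hy : PySem.List.pyRange 2018 2023 1 = [2018, 2019, 2020, 2021, 2022] := by decide
  have hm : PySem.List.pyRange 1 13 1 = [1, 2, 3, 4, 5, 6, 7, 8, 9, 10, 11, 12] := by decide
  unfold generate_to_order pvTriples pvAblock
  rw [hy, hm]
  norm_num [List.flatMap_cons, List.flatMap_nil, List.append_assoc]

theorem B_norm (il : Int) :
    generate_to_order_alt il
      = pvTriples.flatMap (fun v => pvBblock il (PySem.Int.floordiv 60 il) v.1 v.2.1 v.2.2) := by
  have y365 : ∀ (q year : Int),
      (PySem.List.pyRange 0 365 1).flatMap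
        (fun r => pvDayPart il q year (pvSplit r [31, 28, 31, 30, 31, 30, 31, 31, 30, 31, 30, 31] 1))
      = blocks [31, 28, 31, 30, 31, 30, 31, 31, 30, 31, 30, 31] 1 (pvDayPart il q year) := by
    intro q year
    rw [show (365 : Int) = ([31, 28, 31, 30, 31, 30, 31, 31, 30, 31, 30, 31] : List Int).sum by norm_num,
      split_enum _ 1 _ (by norm_num)]
  have y366 : ∀ (q year : Int),
      (PySem.List.pyRange 0 366 1).flatMap
        (fun r => pvDayPart il q year (pvSplit r [31, 29, 31, 30, 31, 30, 31, 31, 30, 31, 30, 31] 1))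
      = blocks [31, 29, 31, 30, 31, 30, 31, 31, 30, 31, 30, 31] 1 (pvDayPart il q year) := by
    intro q year
    rw [show (366 : Int) = ([31, 29, 31, 30, 31, 30, 31, 31, 30, 31, 30, 31] : List Int).sum by norm_num,
      split_enum _ 1 _ (by norm_num)]
  show (PySem.List.pyRange 0 ([365, 365, 366, 365, 365] : List Int).sum 1).flatMap
      (pvStamp il (PySem.Int.floordiv 60 il)) = _
  rw [stamp_eq, split_enum _ 0 _ (by norm_num)]
  simp only [blocks, pvMonthPart]
  norm_num
  rw [y365, y365, y366, y365, y365]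
  simp only [blocks, pvTriples, pvBblock, List.flatMap_cons, List.flatMap_nil]
  norm_num [List.append_assoc]

-- ===== VERDICT (by name: the statement is the Claim_ definition above) =====
theorem generate_to_order_spec : Claim_equal_generate_to_order := by
  intro il _ hpre
  unfold Spec_generate_to_order
  rw [A_norm, B_norm]
  by_cases h0q : 0 < PySem.Int.floordiv 60 il
  · refine fm_congr (fun v hv => ?_)
    have hb : 2018 ≤ v.1 ∧ v.1 ≤ 2022 ∧ 1 ≤ v.2.1 ∧ v.2.1 ≤ 12 ∧ 1 ≤ v.2.2 ∧ v.2.2 ≤ 31 := by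
      fin_cases hv <;> norm_num
    exact block_eq il hpre h0q v.1 v.2.1 v.2.2 hb.1 hb.2.1 hb.2.2.1 hb.2.2.2.1 hb.2.2.2.2.1 hb.2.2.2.2.2
  · have hq : PySem.Int.floordiv 60 il ≤ 0 := not_lt.mp h0q
    refine fm_congr (fun v hv => ?_)
    simp [pvAblock, pvBblock, pvDayPart, flatMap_const_nil,
      PySem.List.pyRange_one_eq_nil hq,
      PySem.List.pyRange_one_eq_nil (show 24 * PySem.Int.floordiv 60 il ≤ 0 by omega)]
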